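-- pv_equiv track=rewrite | github.com/hako-mikan/sd-webui-supermerger | scripts/mergers/mergers.py | blocker
-- ===== SOURCE A (Python) =====
-- def blocker(blocks,blockids):
--     blocks = blocks.split(" ")
--     output = ""
--     for w in blocks:
--         flagger=[False]*len(blockids)
--         changer = True
--         if "-" in w:
--             wt = [wt.strip() for wt in w.split('-')]
--             if  blockids.index(wt[1]) > blockids.index(wt[0]):
--                 flagger[blockids.index(wt[0]):blockids.index(wt[1])+1] = [changer]*(blockids.index(wt[1])-blockids.index(wt[0])+1)
--             else:
--                 flagger[blockids.index(wt[1]):blockids.index(wt[0])+1] = [changer]*(blockids.index(wt[0])-blockids.index(wt[1])+1)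
--         else:
--             output = output + " " + w if output else w
--         for i in range(len(blockids)):
--             if flagger[i]: output = output + " " + blockids[i] if output else blockids[i]
--     return output
-- ===== SOURCE B (Python) =====
-- def blocker(blocks, blockids):
--     output = ""
--     for w in blocks.split(" "):
--         if "-" in w:
--             wt = [t.strip() for t in w.split('-')]
--             i = blockids.index(wt[0])
--             j = blockids.index(wt[1])
--             lo, hi = (i, j) if i <= j else (j, i)
--             for b in blockids[lo:hi + 1]:
--                 output = output + " " + b if output else b
--         else:
--             output = output + " " + w if output else w
--     return output
-- ===== Notes on version B (the rewrite author's own statement) =====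
-- stated objective: simpler
-- what changed: B drops A's boolean flagger mask and its full scan of blockids after every token: for a hyphen token it iterates only the slice blockids[lo:hi+1] directly, otherwise it appends the word, using the same conditional accumulation.
import Mathlib
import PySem

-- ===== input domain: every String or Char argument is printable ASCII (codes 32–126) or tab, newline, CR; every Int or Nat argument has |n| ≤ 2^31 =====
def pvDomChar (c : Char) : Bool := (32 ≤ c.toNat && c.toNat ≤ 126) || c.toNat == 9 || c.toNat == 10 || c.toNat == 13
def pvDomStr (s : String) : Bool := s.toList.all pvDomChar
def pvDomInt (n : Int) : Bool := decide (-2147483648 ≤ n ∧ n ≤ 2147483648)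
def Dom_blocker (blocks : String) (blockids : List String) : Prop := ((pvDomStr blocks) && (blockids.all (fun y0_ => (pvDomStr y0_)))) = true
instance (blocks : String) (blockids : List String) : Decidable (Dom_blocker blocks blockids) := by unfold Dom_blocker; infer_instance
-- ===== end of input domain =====

-- B drops A's boolean flagger mask and its full scan of blockids per token, iterating only the relevant slice (objective: simpler).

-- ===== PORT A =====
-- 'output = output + " " + w if output else w' (accumulated on code points; String.ofList at the end of the port)
def pvAppA (out : List Char) (w : List Char) : List Char :=
  if out = [] then w else out ++ ' ' :: w

def blocker (blocks : String) (blockids : List String) : String :=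
  let toks := PySem.Chars.splitOn blocks.toList " ".toList
  let n := blockids.length
  String.ofList <| toks.foldl (fun out w =>
    let flagger := List.replicate n false
    let s :=
      if PySem.Chars.isIn "-".toList w then
        let wt := (PySem.Chars.splitOn w "-".toList).map PySem.Chars.strip
        let j0 := (PySem.List.index? blockids (String.ofList (wt.getD 0 []))).getD 0
        let j1 := (PySem.List.index? blockids (String.ofList (wt.getD 1 []))).getD 0
        if j1 > j0 then
          (out, flagger.take j0 ++ List.replicate (j1 - j0 + 1) true ++ flagger.drop (j1 + 1))
        else
          (out, flagger.take j1 ++ List.replicate (j0 - j1 + 1) true ++ flagger.drop (j0 + 1))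
      else (pvAppA out w, flagger)
    (List.range n).foldl (fun o i =>
      if s.2.getD i false then pvAppA o ((blockids.getD i "").toList) else o) s.1) []

-- ===== PORT B =====
def pvAppB (out : List Char) (w : List Char) : List Char :=
  if out = [] then w else out ++ ' ' :: w

def blocker_alt (blocks : String) (blockids : List String) : String :=
  String.ofList <| (PySem.Chars.splitOn blocks.toList " ".toList).foldl (fun out w =>
    if PySem.Chars.isIn "-".toList w then
      let wt := (PySem.Chars.splitOn w "-".toList).map PySem.Chars.strip
      let i := (PySem.List.index? blockids (String.ofList (wt.getD 0 []))).getD 0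
      let j := (PySem.List.index? blockids (String.ofList (wt.getD 1 []))).getD 0
      let lo := if i ≤ j then i else j
      let hi := if i ≤ j then j else i
      (PySem.List.slice blockids (some (lo : Int)) (some ((hi : Int) + 1))).foldl
        (fun o b => pvAppB o b.toList) out
    else pvAppB out w) []

-- ===== PRECONDITION & SPEC =====
-- Pre_ excludes exactly the inputs where Python's list.index raises ValueError: some token containing
-- a hyphen whose first or second stripped '-'-part is not an element of blockids.
def Pre_blocker (blocks : String) (blockids : List String) : Prop :=
  ∀ w ∈ PySem.Chars.splitOn blocks.toList " ".toList, PySem.Chars.isIn "-".toList w = true →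
    String.ofList (((PySem.Chars.splitOn w "-".toList).map PySem.Chars.strip).getD 0 []) ∈ blockids ∧
    String.ofList (((PySem.Chars.splitOn w "-".toList).map PySem.Chars.strip).getD 1 []) ∈ blockids
instance (blocks : String) (blockids : List String) : Decidable (Pre_blocker blocks blockids) := by
  unfold Pre_blocker; infer_instance
def pvWitness_blocker : String × List String := ("in02-in01 out", ["in00", "in01", "in02", "out"])
def Spec_blocker (blocks : String) (blockids : List String) (out : String) : Prop := out = blocker_alt blocks blockids
instance (blocks : String) (blockids : List String) (out : String) : Decidable (Spec_blocker blocks blockids out) := by unfold Spec_blocker; infer_instance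

-- ===== CLAIM (what is proved, stated in full; the proofs are below) =====
def Claim_equal_blocker : Prop := ∀ (blocks : String) (blockids : List String), Dom_blocker blocks blockids → Pre_blocker blocks blockids → Spec_blocker blocks blockids (blocker blocks blockids)

-- ===== LEMMAS AND PROOFS =====

theorem pvAppB_eq_pvAppA : pvAppB = pvAppA := rfl

-- the slice-assigned flagger list of A reads as the interval test lo ≤ i ≤ hi
theorem pvFlag_getD (n lo hi i : Nat) (hlo : lo ≤ hi) (hhi : hi < n) :
    ((List.replicate n false).take lo ++ List.replicate (hi - lo + 1) true ++
      (List.replicate n false).drop (hi + 1)).getD i false = decide (lo ≤ i ∧ i ≤ hi) := by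
  rw [show (List.replicate n false).take lo = List.replicate lo false by
        rw [List.take_replicate]; congr 1; omega,
      List.drop_replicate, List.append_assoc]
  rcases Nat.lt_or_ge i lo with h | h
  · rw [List.getD_append _ _ _ _ (by simpa using h), List.getD_replicate _ (by omega)]
    exact (decide_eq_false (by omega)).symm
  · rw [List.getD_append_right _ _ _ _ (by simpa using h)]
    rcases Nat.lt_or_ge i (hi + 1) with h2 | h2
    · rw [List.getD_append _ _ _ _ (by simp; omega), List.getD_replicate _ (by simp; omega)]
      exact (decide_eq_true (by omega)).symm
    · rw [List.getD_append_right _ _ _ _ (by simp; omega)]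
      have hx : ¬(lo ≤ i ∧ i ≤ hi) := by omega
      simp only [List.getD_eq_getElem?_getD, List.getElem?_replicate, hx, decide_false]
      split <;> rfl

-- the filtered index range is exactly [lo, hi]
theorem pvFilter_range (n lo hi : Nat) (hlo : lo ≤ hi) (hhi : hi < n) :
    (List.range n).filter (fun i => decide (lo ≤ i ∧ i ≤ hi)) = List.range' lo (hi + 1 - lo) := by
  have hsplit : List.range n =
      List.range' 0 lo ++ List.range' lo (hi + 1 - lo) ++ List.range' (hi + 1) (n - (hi + 1)) := by
    rw [List.append_assoc, List.range_eq_range']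
    rw [show List.range' (hi + 1) (n - (hi + 1)) = List.range' (lo + 1 * (hi + 1 - lo)) (n - (hi + 1)) (1 : Nat) by congr 1; omega]
    rw [List.range'_append]
    rw [show List.range' lo (hi + 1 - lo + (n - (hi + 1))) = List.range' (0 + 1 * lo) (hi + 1 - lo + (n - (hi + 1))) (1 : Nat) by congr 1; omega]
    rw [List.range'_append]
    congr 1; omega
  rw [hsplit, List.filter_append, List.filter_append]
  rw [List.filter_eq_nil_iff.mpr (by intro a ha; simp [List.mem_range'_1] at ha ⊢; omega)]
  rw [List.filter_eq_self.mpr (by intro a ha; simp [List.mem_range'_1] at ha ⊢; omega)]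
  rw [List.filter_eq_nil_iff.mpr (by intro a ha; simp [List.mem_range'_1] at ha ⊢; omega)]
  simp

-- the indices [lo, hi] read off exactly the slice of blockids
theorem pvRange'_map (bids : List String) (lo hi : Nat) (hlo : lo ≤ hi) (hhi : hi < bids.length) :
    (List.range' lo (hi + 1 - lo)).map (fun i => bids.getD i "") =
      List.take (hi + 1 - lo) (List.drop lo bids) := by
  apply List.ext_getElem
  · simp; omega
  · intro k h1 h2
    simp only [List.getElem_map, List.getElem_range', List.getElem_take, List.getElem_drop]
    rw [List.getD_eq_getElem bids "" (by simp at h1 ⊢; omega)]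
    congr 1
    omega

-- A's mask scan over all of blockids equals B's walk over the slice
theorem pvInterval_fold (bids : List String) (lo hi : Nat) (hlo : lo ≤ hi) (hhi : hi < bids.length)
    (out : List Char) :
    (List.range bids.length).foldl (fun o i =>
        if ((List.replicate bids.length false).take lo ++ List.replicate (hi - lo + 1) true ++
            (List.replicate bids.length false).drop (hi + 1)).getD i false
        then pvAppA o ((bids.getD i "").toList) else o) out
    = (List.take (hi + 1 - lo) (List.drop lo bids)).foldl (fun o b => pvAppA o b.toList) out := by
  rw [PySem.List.foldl_congr_mem _ _
      (fun o i => if decide (lo ≤ i ∧ i ≤ hi) then pvAppA o ((bids.getD i "").toList) else o) _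
      (by intro acc x _; rw [pvFlag_getD _ _ _ _ hlo hhi])]
  rw [PySem.List.foldl_if_eq_foldl_filter (fun i => decide (lo ≤ i ∧ i ≤ hi))
      (fun o i => pvAppA o ((bids.getD i "").toList))]
  rw [pvFilter_range _ _ _ hlo hhi]
  rw [← pvRange'_map bids lo hi hlo hhi, List.foldl_map]

-- a mask that stays all-false contributes nothing
theorem pvFalse_fold (bids : List String) (out : List Char) :
    (List.range bids.length).foldl (fun o i =>
        if (List.replicate bids.length false).getD i false
        then pvAppA o ((bids.getD i "").toList) else o) out = out := by
  rw [PySem.List.foldl_congr_mem _ _ (fun o _ => o) _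
      (by intro acc x hx; rw [List.getD_replicate _ (List.mem_range.mp hx)]; rfl)]
  exact PySem.List.foldl_ignore _ _

theorem pvIndex_lt {bids : List String} {k : String} {j : Nat}
    (h : PySem.List.index? bids k = some j) : j < bids.length := by
  obtain ⟨hk, -, -⟩ := PySem.List.getElem_of_index?_eq_some h
  exact hk

-- ===== VERDICT (by name: the statement is the Claim_ definition above) =====
theorem blocker_spec : Claim_equal_blocker := by
  intro blocks blockids _ hpre
  unfold Spec_blocker blocker blocker_alt
  dsimp only
  congr 1
  apply PySem.List.foldl_congr_mem
  intro out w hw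
  dsimp only
  by_cases hh : PySem.Chars.isIn "-".toList w = true
  · obtain ⟨hm0, hm1⟩ := hpre w hw hh
    obtain ⟨j0, hj0⟩ := Option.isSome_iff_exists.mp ((PySem.List.index?_isSome_iff _ _).mpr hm0)
    obtain ⟨j1, hj1⟩ := Option.isSome_iff_exists.mp ((PySem.List.index?_isSome_iff _ _).mpr hm1)
    have hl0 := pvIndex_lt hj0
    have hl1 := pvIndex_lt hj1
    rw [hj0, hj1]
    simp only [hh, if_true, Option.getD_some, pvAppB_eq_pvAppA]
    rcases Nat.lt_or_ge j0 j1 with hlt | hge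
    · rw [if_pos (show j1 > j0 from hlt), if_pos (show j0 ≤ j1 by omega),
          if_pos (show j0 ≤ j1 by omega)]
      rw [show ((j1 : Int) + 1) = ((j1 + 1 : Nat) : Int) by push_cast; ring, PySem.List.slice_natCast]
      exact pvInterval_fold blockids j0 j1 (by omega) hl1 out
    · rw [if_neg (show ¬ j1 > j0 by omega)]
      rcases Nat.eq_or_lt_of_le hge with heq | hlt2
      · rw [if_pos (show j0 ≤ j1 by omega), if_pos (show j0 ≤ j1 by omega)]
        rw [show ((j1 : Int) + 1) = ((j1 + 1 : Nat) : Int) by push_cast; ring, PySem.List.slice_natCast]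
        rw [show j0 = j1 from heq.symm]
        exact pvInterval_fold blockids j1 j1 (le_refl _) hl1 out
      · rw [if_neg (show ¬ j0 ≤ j1 by omega), if_neg (show ¬ j0 ≤ j1 by omega)]
        rw [show ((j0 : Int) + 1) = ((j0 + 1 : Nat) : Int) by push_cast; ring, PySem.List.slice_natCast]
        exact pvInterval_fold blockids j1 j0 (by omega) hl0 out
  · simp only [hh, if_false, Bool.false_eq_true, pvAppB_eq_pvAppA]
    exact pvFalse_fold blockids (pvAppA out w)
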